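-- pv_equiv track=rewrite | github.com/doopyo85/educosmo | docs/content_sample/cospro_2-2_p01.py | solution
-- ===== SOURCE A (Python) =====
-- def func_a(gloves):
--     # 제품 번호별 개수를 세는 함수
--     count = {}
--     for glove in gloves:
--         if glove in count:
--             count[glove] += 1
--         else:
--             count[glove] = 1
--     return count
--
-- def solution(left_gloves, right_gloves):
--     left_count = func_a(left_gloves)
--     right_count = func_a(right_gloves)
--
--     total_pairs = 0
--
--     # 모든 제품 번호에 대해 확인
--     all_numbers = set(left_count.keys()) | set(right_count.keys())
--
--     for number in all_numbers:
--         left_num = left_count.get(number, 0)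
--         right_num = right_count.get(number, 0)
--         # 각 제품 번호별로 만들 수 있는 쌍의 개수는 min(왼손, 오른손)
--         total_pairs += min(left_num, right_num)
--
--     return total_pairs
-- ===== SOURCE B (Python) =====
-- def solution(left_gloves, right_gloves):
--     left = sorted(left_gloves)
--     right = sorted(right_gloves)
--     total_pairs = 0
--     i = 0
--     j = 0
--     while i < len(left) and j < len(right):
--         if left[i] < right[j]:
--             i += 1
--         elif right[j] < left[i]:
--             j += 1
--         else:
--             total_pairs += 1
--             i += 1
--             j += 1
--     return total_pairs
-- ===== Notes on version B (the rewrite author's own statement) =====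
-- stated objective: alternative
-- what changed: Replaces the two frequency dictionaries and the per-key min-sum over the union of key sets by sorting copies of both lists and counting equal elements with a single two-pointer merge walk.
import Mathlib
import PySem

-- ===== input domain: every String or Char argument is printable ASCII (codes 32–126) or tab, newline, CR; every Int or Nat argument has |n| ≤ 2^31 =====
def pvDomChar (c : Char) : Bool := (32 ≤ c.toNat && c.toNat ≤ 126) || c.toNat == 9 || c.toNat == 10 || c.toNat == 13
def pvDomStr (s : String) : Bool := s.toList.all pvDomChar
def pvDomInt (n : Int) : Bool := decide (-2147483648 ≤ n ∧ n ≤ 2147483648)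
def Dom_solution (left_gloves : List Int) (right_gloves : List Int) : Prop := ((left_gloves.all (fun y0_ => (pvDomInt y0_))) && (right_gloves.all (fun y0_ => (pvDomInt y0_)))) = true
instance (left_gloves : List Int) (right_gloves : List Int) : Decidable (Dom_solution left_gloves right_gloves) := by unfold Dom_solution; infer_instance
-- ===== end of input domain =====

-- B replaces A's two frequency dicts + min-sum over the union of their key sets by a
-- two-pointer merge walk over sorted copies of the inputs (alternative algorithm).

-- ===== PORT A =====
def func_a (gloves : List Int) : PySem.Dict Int Int :=
  gloves.foldl (fun count glove =>
    if count.contains glove then count.insert glove (count.getD glove 0 + 1)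
    else count.insert glove 1) PySem.Dict.empty

def solution (left_gloves : List Int) (right_gloves : List Int) : Int :=
  let left_count := func_a left_gloves
  let right_count := func_a right_gloves
  let all_numbers : PySem.Set Int :=
    PySem.Set.union (PySem.Set.ofList left_count.keys) (PySem.Set.ofList right_count.keys)
  all_numbers.foldl (fun total_pairs number =>
    total_pairs + min (left_count.getD number 0) (right_count.getD number 0)) 0

-- ===== PORT B =====
-- the while loop over indices i, j of Source B, as recursion on the two (sorted) suffixes
def mergeCount : List Int → List Int → Int
  | [], _ => 0
  | _ :: _, [] => 0
  | a :: l, b :: r =>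
    if a < b then mergeCount l (b :: r)
    else if b < a then mergeCount (a :: l) r
    else mergeCount l r + 1
termination_by l r => l.length + r.length

def solution_alt (left_gloves : List Int) (right_gloves : List Int) : Int :=
  mergeCount (PySem.List.sorted left_gloves (fun x => x) false)
             (PySem.List.sorted right_gloves (fun x => x) false)

-- ===== PRECONDITION & SPEC =====
def Spec_solution (left_gloves : List Int) (right_gloves : List Int) (out : Int) : Prop := out = solution_alt left_gloves right_gloves
instance (left_gloves : List Int) (right_gloves : List Int) (out : Int) : Decidable (Spec_solution left_gloves right_gloves out) := by unfold Spec_solution; infer_instance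

-- ===== CLAIM (what is proved, stated in full; the proofs are below) =====
def Claim_equal_solution : Prop := ∀ (left_gloves : List Int) (right_gloves : List Int), Dom_solution left_gloves right_gloves → Spec_solution left_gloves right_gloves (solution left_gloves right_gloves)

-- ===== LEMMAS AND PROOFS =====

-- A's counting loop is the canonical counter loop (in the 'else' branch, getD gives 0)
theorem func_a_eq_counter (xs : List Int) :
    func_a xs = xs.foldl (fun d x => d.insert x (d.getD x 0 + 1)) PySem.Dict.empty := by
  unfold func_a
  congr 1
  funext d x
  by_cases h : d.contains x
  · simp [h]
  · simp only [Bool.not_eq_true] at h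
    simp [h, PySem.Dict.getD_of_not_contains d 0 h]

theorem func_a_getD (xs : List Int) (v : Int) :
    (func_a xs).getD v 0 = (xs.count v : Int) := by
  rw [func_a_eq_counter, PySem.Dict.getD_foldl_insert_add_one]
  simp [PySem.Dict.empty, PySem.Dict.getD, PySem.Dict.get?]

theorem func_a_keys (xs : List Int) :
    (func_a xs).keys = PySem.Set.ofList xs := by
  rw [func_a_eq_counter, PySem.Dict.keys_foldl_insert]
  simp [PySem.Dict.empty, PySem.Set.update_nil_left]

-- the sum of per-number minima over any duplicate-free list covering l
-- is the size of the multiset intersection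
theorem sum_min_eq_inter_card (S l r : List Int) (hnd : S.Nodup)
    (hl : ∀ v ∈ l, v ∈ S) :
    (S.map (fun n => min ((l.count n : Int)) ((r.count n : Int)))).sum
      = (((l : Multiset Int) ∩ (r : Multiset Int)).card : Int) := by
  have h1 : (S.map (fun n => min ((l.count n : Int)) ((r.count n : Int)))).sum
      = ((S.map (fun n => min (l.count n) (r.count n))).sum : Nat) := by
    push_cast
    simp [Function.comp_def, Nat.cast_min]
  rw [h1]
  congr 1
  rw [← List.sum_toFinset _ hnd,
      ← Multiset.toFinset_sum_count_eq ((l : Multiset Int) ∩ (r : Multiset Int))]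
  have hsub : ((l : Multiset Int) ∩ (r : Multiset Int)).toFinset ⊆ S.toFinset := by
    intro a ha
    simp only [Multiset.toFinset_inter, Finset.mem_inter, Multiset.mem_toFinset] at ha
    exact List.mem_toFinset.mpr (hl a (by simpa using ha.1))
  have hzero : ∀ x ∈ S.toFinset, x ∉ ((l : Multiset Int) ∩ (r : Multiset Int)).toFinset →
      Multiset.count x ((l : Multiset Int) ∩ (r : Multiset Int)) = 0 := by
    intro x _ hx
    simp only [Multiset.mem_toFinset] at hx
    exact Multiset.count_eq_zero.mpr hx
  rw [Finset.sum_subset hsub hzero]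
  apply Finset.sum_congr rfl
  intro x _
  rw [Multiset.count_inter]
  simp

-- A computes the size of the multiset intersection
theorem solution_eq_card (l r : List Int) :
    solution l r = ((((l : Multiset Int)) ∩ ((r : Multiset Int))).card : Int) := by
  unfold solution
  simp only [func_a_keys]
  set S : List Int := PySem.Set.union (PySem.Set.ofList (PySem.Set.ofList l))
      (PySem.Set.ofList (PySem.Set.ofList r)) with hS
  have hnd : S.Nodup := PySem.Set.nodup_union _ _ (PySem.Set.nodup_ofList _)
  have hl : ∀ v ∈ l, v ∈ S := by
    intro v hv
    rw [hS, PySem.Set.mem_union]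
    left
    rw [PySem.Set.mem_ofList, PySem.Set.mem_ofList]
    exact hv
  rw [PySem.List.foldl_add]
  simp only [func_a_getD]
  rw [zero_add]
  exact sum_min_eq_inter_card S l r hnd hl

-- the merge walk on sorted lists computes the size of the multiset intersection
theorem mergeCount_eq_inter_card (l r : List Int)
    (hl : l.Pairwise (· ≤ ·)) (hr : r.Pairwise (· ≤ ·)) :
    mergeCount l r = (((l : Multiset Int) ∩ (r : Multiset Int)).card : Int) := by
  induction l, r using mergeCount.induct with
  | case1 r => simp [mergeCount]
  | case2 a l => simp [mergeCount]
  | case3 a l b r hab ih =>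
    have hble : ∀ y ∈ r, b ≤ y := (List.pairwise_cons.mp hr).1
    have hnotmem : a ∉ ((b :: r : List Int) : Multiset Int) := by
      rw [Multiset.mem_coe]
      simp only [List.mem_cons, not_or]
      refine ⟨by omega, fun hm => ?_⟩
      have := hble a hm
      omega
    have hm : ((a :: l : List Int) : Multiset Int) ∩ ((b :: r : List Int) : Multiset Int)
        = ((l : List Int) : Multiset Int) ∩ ((b :: r : List Int) : Multiset Int) := by
      rw [← Multiset.cons_coe, Multiset.cons_inter_of_neg _ hnotmem]
    rw [mergeCount]
    simp only [if_pos hab]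
    rw [ih hl.tail hr, hm]
  | case4 a l b r hab hba ih =>
    have hale : ∀ y ∈ l, a ≤ y := (List.pairwise_cons.mp hl).1
    have hnotmem : b ∉ ((a :: l : List Int) : Multiset Int) := by
      rw [Multiset.mem_coe]
      simp only [List.mem_cons, not_or]
      refine ⟨by omega, fun hm => ?_⟩
      have := hale b hm
      omega
    have hm : ((a :: l : List Int) : Multiset Int) ∩ ((b :: r : List Int) : Multiset Int)
        = ((a :: l : List Int) : Multiset Int) ∩ ((r : List Int) : Multiset Int) := by
      rw [Multiset.inter_comm, ← Multiset.cons_coe, Multiset.cons_inter_of_neg _ hnotmem,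
          Multiset.inter_comm]
    rw [mergeCount]
    simp only [if_neg (by omega : ¬ a < b), if_pos hba]
    rw [ih hl hr.tail, hm]
  | case5 a l b r hab hba ih =>
    have heq : a = b := le_antisymm (by omega) (by omega)
    subst heq
    have hm : ((a :: l : List Int) : Multiset Int) ∩ ((a :: r : List Int) : Multiset Int)
        = a ::ₘ (((l : List Int) : Multiset Int) ∩ ((r : List Int) : Multiset Int)) := by
      rw [← Multiset.cons_coe, ← Multiset.cons_coe,
          Multiset.cons_inter_of_pos _ (by simp), Multiset.erase_cons_head]
    rw [mergeCount]
    simp only [if_neg (by omega : ¬ a < a)]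
    rw [ih hl.tail hr.tail, hm]
    simp

-- B computes the size of the multiset intersection
theorem solution_alt_eq_card (l r : List Int) :
    solution_alt l r = ((((l : Multiset Int)) ∩ ((r : Multiset Int))).card : Int) := by
  unfold solution_alt
  rw [mergeCount_eq_inter_card _ _
      (PySem.List.sorted_pairwise l (fun x => x))
      (PySem.List.sorted_pairwise r (fun x => x))]
  rw [(Multiset.coe_eq_coe.mpr (PySem.List.sorted_perm l (fun x => x) false) :
        ((PySem.List.sorted l (fun x => x) false : List Int) : Multiset Int) = (l : Multiset Int)),
      (Multiset.coe_eq_coe.mpr (PySem.List.sorted_perm r (fun x => x) false) :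
        ((PySem.List.sorted r (fun x => x) false : List Int) : Multiset Int) = (r : Multiset Int))]

-- ===== VERDICT (by name: the statement is the Claim_ definition above) =====
theorem solution_spec : Claim_equal_solution := by
  intro l r _
  unfold Spec_solution
  rw [solution_eq_card, solution_alt_eq_card]
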